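-- pv_equiv track=rewrite | github.com/meghanvoneill/CS5340 | project/qa.py | condense_answer_options
-- ===== SOURCE A (Python) =====
-- def condense_answer_options(answers):
--
--     length_sorted_answers = sorted(answers, key=len)
--     new_answers = []
--
--     # Grab the words by the shortest first.
--     for short_answer in length_sorted_answers:
--         # For each answer to compare this to, if we find any that contain this answer already, do not add
--         # the short answer.
--         add = True
--         found_duplicate_component = False
--         for answer in length_sorted_answers:
--             # Skip if comparing to itself.
--             if short_answer == answer:
--                 continue
--             else:
--                 answer_split = answer.split()
--                 # If the short answer is contained by the answer, we have found a duplicate.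
--                 if short_answer in answer_split:
--                     found_duplicate_component = True
--                     continue
--
--         if found_duplicate_component:
--             add = False
--         if add:
--             new_answers.append(short_answer)
--
--     return new_answers
-- ===== SOURCE B (Python) =====
-- def condense_answer_options(answers):
--     # One pass over all words: collect every word that occurs inside a different answer.
--     banned = set()
--     for ans in answers:
--         for w in ans.split():
--             if w != ans:
--                 banned.add(w)
--     return [a for a in sorted(answers, key=len) if a not in banned]
-- ===== Notes on version B (the rewrite author's own statement) =====
-- stated objective: faster
-- what changed: Replaces A's nested scan (for each answer, re-splitting and checking every other answer) with a single pass that collects every word occurring inside a different answer into one set, then filters the length-sorted list by a set lookup.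
import Mathlib
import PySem

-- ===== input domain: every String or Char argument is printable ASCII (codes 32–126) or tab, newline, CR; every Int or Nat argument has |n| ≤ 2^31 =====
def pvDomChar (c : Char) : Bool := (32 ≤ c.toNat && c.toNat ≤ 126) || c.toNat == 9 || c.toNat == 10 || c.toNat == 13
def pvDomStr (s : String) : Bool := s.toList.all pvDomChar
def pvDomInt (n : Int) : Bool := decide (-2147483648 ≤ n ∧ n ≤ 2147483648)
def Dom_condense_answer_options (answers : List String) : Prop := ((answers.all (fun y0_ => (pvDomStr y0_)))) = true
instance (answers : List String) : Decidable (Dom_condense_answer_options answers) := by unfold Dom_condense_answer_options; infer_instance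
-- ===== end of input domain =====

-- B replaces A's quadratic all-pairs scan by one banned-word set built in a single pass (objective: faster).


-- ===== PORT A =====
def condense_answer_options (answers : List String) : List String :=
  let length_sorted_answers := PySem.List.sorted answers (fun s => PySem.Str.len s) false
  length_sorted_answers.foldl (fun new_answers short_answer =>
    let add := true
    let found_duplicate_component :=
      length_sorted_answers.foldl (fun fdc answer =>
        if short_answer == answer then fdc
        else
          let answer_split := PySem.Str.split₀ answer
          if answer_split.contains short_answer then true else fdc) false
    let add := if found_duplicate_component then false else add
    if add then new_answers ++ [short_answer] else new_answers) []

-- ===== PORT B =====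
def condense_answer_options_alt (answers : List String) : List String :=
  let banned : PySem.Set String :=
    answers.foldl (fun banned ans =>
      (PySem.Str.split₀ ans).foldl (fun banned w =>
        if w ≠ ans then PySem.Set.add banned w else banned) banned) PySem.Set.empty
  (PySem.List.sorted answers (fun s => PySem.Str.len s) false).filter
    (fun a => !(PySem.Set.contains banned a))

-- ===== PRECONDITION & SPEC =====
def Spec_condense_answer_options (answers : List String) (out : List String) : Prop := out = condense_answer_options_alt answers
instance (answers : List String) (out : List String) : Decidable (Spec_condense_answer_options answers out) := by unfold Spec_condense_answer_options; infer_instance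

-- ===== CLAIM (what is proved, stated in full; the proofs are below) =====
def Claim_equal_condense_answer_options : Prop := ∀ (answers : List String), Dom_condense_answer_options answers → Spec_condense_answer_options answers (condense_answer_options answers)

-- ===== LEMMAS AND PROOFS =====

-- A's inner loop is an "any" over the list.
lemma innerA_eq_any (s : String) (l : List String) (b : Bool) :
    l.foldl (fun fdc answer =>
      if s == answer then fdc
      else
        let answer_split := PySem.Str.split₀ answer
        if answer_split.contains s then true else fdc) b
    = (b || l.any (fun answer => !(s == answer) && (PySem.Str.split₀ answer).contains s)) := by
  induction l generalizing b with
  | nil => simp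
  | cons a l ih =>
    simp only [List.foldl_cons, List.any_cons, ih]
    by_cases h : (s == a) = true <;> by_cases hc : ((PySem.Str.split₀ a).contains s) = true <;>
      cases b <;> simp_all

-- membership in B's inner word loop
lemma innerB_mem (y : String) (ans : String) (ws : List String) (s : PySem.Set String) :
    (y ∈ ws.foldl (fun banned w => if w ≠ ans then PySem.Set.add banned w else banned) s)
    ↔ y ∈ s ∨ (y ∈ ws ∧ y ≠ ans) := by
  induction ws generalizing s with
  | nil => simp
  | cons w ws ih =>
    simp only [List.foldl_cons]
    by_cases h : w = ans <;>
      simp only [h, ne_eq, not_true_eq_false, not_false_eq_true, if_true, if_false, ih,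
        PySem.Set.mem_add, List.mem_cons] <;> aesop

-- membership in B's banned set
lemma banned_mem (y : String) (l : List String) (s : PySem.Set String) :
    (y ∈ l.foldl (fun banned ans =>
        (PySem.Str.split₀ ans).foldl (fun banned w =>
          if w ≠ ans then PySem.Set.add banned w else banned) banned) s)
    ↔ y ∈ s ∨ ∃ ans ∈ l, y ∈ PySem.Str.split₀ ans ∧ y ≠ ans := by
  induction l generalizing s with
  | nil => simp
  | cons a l ih =>
    simp only [List.foldl_cons, ih, innerB_mem, List.mem_cons]
    constructor
    · rintro ((hy | hy) | ⟨ans, hans, hmem⟩)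
      · exact Or.inl hy
      · exact Or.inr ⟨a, Or.inl rfl, hy⟩
      · exact Or.inr ⟨ans, Or.inr hans, hmem⟩
    · rintro (hy | ⟨ans, (rfl | hans), hmem⟩)
      · exact Or.inl (Or.inl hy)
      · exact Or.inl (Or.inr hmem)
      · exact Or.inr ⟨ans, hans, hmem⟩

-- ===== VERDICT (by name: the statement is the Claim_ definition above) =====
theorem condense_answer_options_spec : Claim_equal_condense_answer_options := by
  intro answers _
  unfold Spec_condense_answer_options condense_answer_options condense_answer_options_alt
  set lsa := PySem.List.sorted answers (fun s => PySem.Str.len s) false with hlsa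
  simp only [innerA_eq_any, Bool.false_or]
  have hstep : ∀ (acc : List String) (sa : String),
      (let add := true
       let found := lsa.any (fun answer => !(sa == answer) && (PySem.Str.split₀ answer).contains sa)
       let add := if found then false else add
       if add then acc ++ [sa] else acc)
      = (if !(lsa.any (fun answer => !(sa == answer) && (PySem.Str.split₀ answer).contains sa))
         then acc ++ [sa] else acc) := by
    intro acc sa
    by_cases h : (lsa.any (fun answer => !(sa == answer) && (PySem.Str.split₀ answer).contains sa)) = true
    · simp only [h]; rfl
    · simp only [Bool.not_eq_true] at h; simp only [h]; rfl
  simp only [hstep, PySem.List.foldl_append_if]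
  simp only [List.nil_append, List.map_id']
  apply (List.filter_congr _).symm
  intro x _
  congr 1
  rw [Bool.eq_iff_iff]
  simp only [PySem.Set.contains_iff, banned_mem, PySem.Set.empty, List.not_mem_nil, false_or,
    List.any_eq_true, Bool.and_eq_true, beq_eq_false_iff_ne, Bool.not_eq_eq_eq_not, Bool.not_true, ne_eq, List.contains_eq_mem, decide_eq_true_eq, hlsa, PySem.List.mem_sorted]
  tauto
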